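-- pv_equiv track=rewrite | github.com/TSThamza/UnitTesting_Assignement | Coding_Test_Assignement_WBX.py | first_repeated_num
-- ===== SOURCE A (Python) =====
-- def unique_items(array):
--     #Remove duplicates from each array and Keep the Order
-- 	return (sorted(set(array), key=array.index))
--
-- def first_repeated_num(array1, array2):
--    ref_set = set()
--    no_duplicate = -1
--    #concating only unique items from each array in one single array
--    array=unique_items(array1)+unique_items(array2)
--
--    #making sure all items are integers as been requiered, if not return -1
--    if(all(isinstance(i, int) for i in array)):
--     #checking item by item once a there's match break the function and return it back.
--     for i in range(len(array)):
--         if array[i] in ref_set: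
--             return array[i]
--         else:
--             ref_set.add(array[i])
--    return no_duplicate
-- ===== SOURCE B (Python) =====
-- def first_repeated_num(array1, array2):
--     # Build the membership index from array1 once, then scan array2 only:
--     # the first element of array2 that also occurs in array1 (else -1).
--     seen = set(array1)
--     for x in array2:
--         if x in seen:
--             return x
--     return -1
-- ===== Notes on version B (the rewrite author's own statement) =====
-- stated objective: faster
-- what changed: Instead of deduplicating both arrays with sorted(set(...), key=array.index) (a quadratic index-keyed sort), concatenating them and running a growing seen-set over the combined list, B builds a set from array1 once and returns the first element of array2 found in it.
import Mathlib
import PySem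

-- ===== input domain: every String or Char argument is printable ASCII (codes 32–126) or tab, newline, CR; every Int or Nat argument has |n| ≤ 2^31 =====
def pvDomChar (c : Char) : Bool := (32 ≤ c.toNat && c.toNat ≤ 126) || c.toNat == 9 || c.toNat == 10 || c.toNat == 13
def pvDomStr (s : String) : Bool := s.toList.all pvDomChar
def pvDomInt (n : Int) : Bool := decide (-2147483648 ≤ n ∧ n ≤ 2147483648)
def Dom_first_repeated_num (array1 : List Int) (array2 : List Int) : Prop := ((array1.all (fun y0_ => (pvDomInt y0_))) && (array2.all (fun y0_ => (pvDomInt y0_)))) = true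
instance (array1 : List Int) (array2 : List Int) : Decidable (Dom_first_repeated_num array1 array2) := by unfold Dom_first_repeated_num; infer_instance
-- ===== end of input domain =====

-- B replaces A's dedup-both-then-concat-then-running-seen-set scan by building a set from
-- array1 once and returning the first element of array2 found in it (faster in a timing run).

-- ===== PORT A =====
-- sorted(set(array), key=array.index); every member of set(array) occurs in array, so
-- array.index never raises and the `.getD 0` default is never used.
def unique_items (array : List Int) : List Int :=
  PySem.List.sorted (PySem.Set.ofList array) (fun x => (PySem.List.index? array x).getD 0) false

-- the `for i in range(len(array))` loop over `array` with the growing ref_set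
def pvALoop (array : List Int) (refSet : PySem.Set Int) : Int :=
  match array with
  | [] => -1                                   -- loop ends: return no_duplicate
  | x :: rest =>
    if PySem.Set.contains refSet x then x
    else pvALoop rest (PySem.Set.add refSet x)

def first_repeated_num (array1 : List Int) (array2 : List Int) : Int :=
  let array := unique_items array1 ++ unique_items array2
  -- all(isinstance(i, int) for i in array): always true, every element is an Int
  if array.all (fun _ => true) then pvALoop array PySem.Set.empty
  else -1

-- ===== PORT B =====
def pvBLoop (seen : PySem.Set Int) (array2 : List Int) : Int :=
  match array2 with
  | [] => -1
  | x :: rest => if PySem.Set.contains seen x then x else pvBLoop seen rest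

def first_repeated_num_alt (array1 : List Int) (array2 : List Int) : Int :=
  pvBLoop (PySem.Set.ofList array1) array2

-- ===== PRECONDITION & SPEC =====
def Spec_first_repeated_num (array1 : List Int) (array2 : List Int) (out : Int) : Prop := out = first_repeated_num_alt array1 array2
instance (array1 : List Int) (array2 : List Int) (out : Int) : Decidable (Spec_first_repeated_num array1 array2 out) := by unfold Spec_first_repeated_num; infer_instance

-- ===== CLAIM (what is proved, stated in full; the proofs are below) =====
def Claim_equal_first_repeated_num : Prop := ∀ (array1 : List Int) (array2 : List Int), Dom_first_repeated_num array1 array2 → Spec_first_repeated_num array1 array2 (first_repeated_num array1 array2)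

-- ===== LEMMAS AND PROOFS =====

-- set(l) listed in first-occurrence order is strictly increasing under the key l.index
theorem pairwise_idx_ofList (l : List Int) :
    (PySem.Set.ofList l).Pairwise
      (fun a b => (PySem.List.index? l a).getD 0 < (PySem.List.index? l b).getD 0) := by
  induction l with
  | nil => simp [PySem.Set.ofList_nil]
  | cons x l ih =>
    rw [PySem.Set.ofList_cons]
    have keyshift : ∀ b ∈ l, b ≠ x →
        (PySem.List.index? (x :: l) b).getD 0 = (PySem.List.index? l b).getD 0 + 1 := by
      intro b hb hbx
      obtain ⟨k, hk⟩ := Option.isSome_iff_exists.mp ((PySem.List.index?_isSome_iff l b).mpr hb)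
      rw [PySem.List.index?_cons_of_ne _ (Ne.symm hbx), hk]
      rfl
    refine List.Pairwise.cons ?_ ?_
    · intro b hb
      simp only [PySem.Set.mem_discard, PySem.Set.mem_ofList] at hb
      rw [PySem.List.index?_cons_self, keyshift b hb.1 hb.2]
      simp
    · have hsub : List.Sublist (PySem.Set.discard (PySem.Set.ofList l) x) (PySem.Set.ofList l) :=
        List.filter_sublist
      have hp := List.Pairwise.sublist hsub ih
      refine List.Pairwise.imp_of_mem ?_ hp
      intro a b ha hb hab
      simp only [PySem.Set.mem_discard, PySem.Set.mem_ofList] at ha hb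
      rw [keyshift a ha.1 ha.2, keyshift b hb.1 hb.2]
      omega

-- unique_items is the identity sort: set(l) is already in increasing l.index order
theorem unique_items_eq (l : List Int) : unique_items l = PySem.Set.ofList l := by
  unfold unique_items
  exact PySem.List.sorted_eq_of_perm_of_pairwise_lt _ _ _ (List.Perm.refl _) (pairwise_idx_ofList l)

-- scanning a prefix of fresh, pairwise-distinct elements just accumulates them into the set
theorem pvALoop_append (u t : List Int) (s : PySem.Set Int) (hnd : u.Nodup)
    (hf : ∀ x ∈ u, x ∉ s) : pvALoop (u ++ t) s = pvALoop t (u.foldl PySem.Set.add s) := by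
  induction u generalizing s with
  | nil => rfl
  | cons x u ih =>
    have hx : PySem.Set.contains s x = false := by
      have := hf x (by simp)
      simpa [PySem.Set.contains_iff] using this
    simp only [List.cons_append, pvALoop, hx, Bool.false_eq_true, if_false, List.foldl_cons]
    refine ih _ (List.Nodup.of_cons hnd) (fun y hy => ?_)
    intro hmem
    rcases (PySem.Set.mem_add _ _ _).mp hmem with h1 | h2
    · exact hf y (by simp [hy]) h1
    · exact (List.nodup_cons.mp hnd).1 (h2 ▸ hy)

-- pvBLoop only reads the set: equal membership on the scanned list gives equal results
theorem pvBLoop_congr (l : List Int) (s s' : PySem.Set Int)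
    (h : ∀ y ∈ l, PySem.Set.contains s y = PySem.Set.contains s' y) :
    pvBLoop s l = pvBLoop s' l := by
  induction l with
  | nil => rfl
  | cons x l ih =>
    have hx := h x (by simp)
    simp only [pvBLoop, hx]
    split
    · rfl
    · exact ih (fun y hy => h y (by simp [hy]))

-- on a duplicate-free list the growing ref_set never fires on its own additions
theorem pvALoop_eq_pvBLoop (u : List Int) (s : PySem.Set Int) (hnd : u.Nodup) :
    pvALoop u s = pvBLoop s u := by
  induction u generalizing s with
  | nil => rfl
  | cons x u ih =>
    simp only [pvALoop, pvBLoop]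
    split
    · rfl
    · rw [ih _ (List.Nodup.of_cons hnd)]
      refine pvBLoop_congr _ _ _ (fun y hy => ?_)
      have hyx : y ≠ x := fun h => (List.nodup_cons.mp hnd).1 (h ▸ hy)
      rw [Bool.eq_iff_iff, PySem.Set.contains_iff, PySem.Set.contains_iff,
        PySem.Set.mem_add]
      simp [hyx]

theorem pvBLoop_discard (t : List Int) (s : PySem.Set Int) (x : Int)
    (hx : PySem.Set.contains s x = false) :
    pvBLoop s (PySem.Set.discard t x) = pvBLoop s t := by
  induction t with
  | nil => rfl
  | cons y t ih =>
    by_cases hyx : y = x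
    · subst hyx
      have h1 : PySem.Set.discard (y :: t) y = PySem.Set.discard t y := by
        simp [PySem.Set.discard]
      rw [h1, ih, show pvBLoop s (y :: t) = if PySem.Set.contains s y then y else pvBLoop s t from rfl, hx]
      simp
    · have h1 : PySem.Set.discard (y :: t) x = y :: PySem.Set.discard t x := by
        simp [PySem.Set.discard, hyx]
      rw [h1]
      simp only [pvBLoop]
      split
      · rfl
      · exact ih

-- deduplication of the scanned list does not change the first hit
theorem pvBLoop_ofList (l : List Int) (s : PySem.Set Int) :
    pvBLoop s (PySem.Set.ofList l) = pvBLoop s l := by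
  induction l with
  | nil => rfl
  | cons x l ih =>
    rw [PySem.Set.ofList_cons,
      show pvBLoop s (x :: (PySem.Set.ofList l).discard x) =
        if PySem.Set.contains s x then x
        else pvBLoop s ((PySem.Set.ofList l).discard x) from rfl,
      show pvBLoop s (x :: l) = if PySem.Set.contains s x then x else pvBLoop s l from rfl]
    by_cases hx : PySem.Set.contains s x = true
    · rw [hx]; simp
    · simp only [Bool.not_eq_true] at hx
      rw [hx]
      simp only [Bool.false_eq_true, if_false]
      rw [pvBLoop_discard _ _ _ hx, ih]

-- ===== VERDICT (by name: the statement is the Claim_ definition above) =====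
theorem first_repeated_num_spec : Claim_equal_first_repeated_num := by
  intro array1 array2 _
  unfold Spec_first_repeated_num first_repeated_num first_repeated_num_alt
  simp only [unique_items_eq]
  rw [if_pos (by simp)]
  rw [pvALoop_append _ _ _ (PySem.Set.nodup_ofList _) (by intro x hx; simp [PySem.Set.empty])]
  change pvALoop (PySem.Set.ofList array2) (PySem.Set.ofList (PySem.Set.ofList array1)) = _
  rw [PySem.Set.ofList_ofList,
    pvALoop_eq_pvBLoop _ _ (PySem.Set.nodup_ofList _), pvBLoop_ofList]
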